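-- pv_equiv track=rewrite | github.com/HUSTcyf/astrbot_plugin_paperrag | export_bloom.py | get_node_type
-- ===== SOURCE A (Python) =====
-- def get_node_type(labels: list) -> str:
--     """根据标签获取简化的节点类型"""
--     # 主要类型列表（按优先级）
--     MAIN_TYPES = {
--         "Chunk": ["Chunk"],
--         "Paper": ["Paper"],
--         "Reference": ["Reference"],
--         "Model/Architecture": ["Model/Architecture"],
--         "Method/Technique": ["Method/Technique"],
--         "Task": ["Task"],
--         "Metric": ["Metric"],
--         "Dataset": ["Dataset"],
--         "Author/Organization": ["Author/Organization", "Author"],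
--         "Venue": ["Venue"],
--         "Optimizer/Algorithm": ["Optimizer/Algorithm"],
--         "Framework/Library": ["Framework/Library"],
--         "ImagePath": ["ImagePath"],
--         "Figure": ["Figure:photo", "Figure:diagram", "Figure:chart", "Figure:table", "Figure:graph", "Figure"],
--     }
--
--     for main_type, type_aliases in MAIN_TYPES.items():
--         for alias in type_aliases:
--             if alias in labels:
--                 return main_type
--
--     return "Other"
-- ===== SOURCE B (Python) =====
-- # Flat precomputed alias index: alias -> (priority rank, main type); one pass over labels keeping the best rank.
-- _INDEX = {
--     "Chunk": (0, "Chunk"),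
--     "Paper": (1, "Paper"),
--     "Reference": (2, "Reference"),
--     "Model/Architecture": (3, "Model/Architecture"),
--     "Method/Technique": (4, "Method/Technique"),
--     "Task": (5, "Task"),
--     "Metric": (6, "Metric"),
--     "Dataset": (7, "Dataset"),
--     "Author/Organization": (8, "Author/Organization"),
--     "Author": (9, "Author/Organization"),
--     "Venue": (10, "Venue"),
--     "Optimizer/Algorithm": (11, "Optimizer/Algorithm"),
--     "Framework/Library": (12, "Framework/Library"),
--     "ImagePath": (13, "ImagePath"),
--     "Figure:photo": (14, "Figure"),
--     "Figure:diagram": (15, "Figure"),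
--     "Figure:chart": (16, "Figure"),
--     "Figure:table": (17, "Figure"),
--     "Figure:graph": (18, "Figure"),
--     "Figure": (19, "Figure"),
-- }
--
-- def get_node_type(labels: list) -> str:
--     best = None
--     for label in labels:
--         entry = _INDEX.get(label)
--         if entry is not None and (best is None or entry[0] < best[0]):
--             best = entry
--     return best[1] if best is not None else "Other"
-- ===== Notes on version B (the rewrite author's own statement) =====
-- stated objective: alternative
-- what changed: Replaces A's priority-ordered nested scan of the alias table (early return on the first alias found in labels) with a precomputed flat alias->(rank, main_type) dict and a single pass over labels that keeps the entry of minimal rank.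
import Mathlib
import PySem

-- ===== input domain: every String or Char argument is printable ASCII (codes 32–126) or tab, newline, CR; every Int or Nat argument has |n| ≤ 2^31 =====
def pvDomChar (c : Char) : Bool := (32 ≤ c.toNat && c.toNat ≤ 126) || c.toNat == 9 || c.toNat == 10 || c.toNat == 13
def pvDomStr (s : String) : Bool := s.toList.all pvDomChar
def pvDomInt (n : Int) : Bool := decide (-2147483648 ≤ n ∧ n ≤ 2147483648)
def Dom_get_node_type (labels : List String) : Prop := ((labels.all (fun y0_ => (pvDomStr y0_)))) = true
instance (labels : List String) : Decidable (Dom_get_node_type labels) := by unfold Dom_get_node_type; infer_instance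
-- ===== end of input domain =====

-- B replaces A's priority-ordered scan of the alias table (early return on first alias found in
-- labels) by a single pass over labels with a flat alias→(rank, main type) index, keeping the
-- entry with the smallest rank; objective: alternative decomposition.

-- ===== PORT A =====
-- A's MAIN_TYPES dict (values iterated in insertion order)
def pvTable_get_node_type : List (String × List String) :=
  [("Chunk", ["Chunk"]),
   ("Paper", ["Paper"]),
   ("Reference", ["Reference"]),
   ("Model/Architecture", ["Model/Architecture"]),
   ("Method/Technique", ["Method/Technique"]),
   ("Task", ["Task"]),
   ("Metric", ["Metric"]),
   ("Dataset", ["Dataset"]),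
   ("Author/Organization", ["Author/Organization", "Author"]),
   ("Venue", ["Venue"]),
   ("Optimizer/Algorithm", ["Optimizer/Algorithm"]),
   ("Framework/Library", ["Framework/Library"]),
   ("ImagePath", ["ImagePath"]),
   ("Figure", ["Figure:photo", "Figure:diagram", "Figure:chart", "Figure:table", "Figure:graph", "Figure"])]

-- inner loop: 'for alias in type_aliases: if alias in labels: return main_type'
def pvInnerA (labels : List String) (mainType : String) : List String → Option String
  | [] => none
  | al :: rest =>
      if labels.contains al then some mainType else pvInnerA labels mainType rest

-- outer loop: 'for main_type, type_aliases in MAIN_TYPES.items(): …' with early return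
def pvOuterA (labels : List String) : List (String × List String) → String
  | [] => "Other"
  | (mainType, aliases) :: rest =>
      match pvInnerA labels mainType aliases with
      | some t => t
      | none => pvOuterA labels rest

def get_node_type (labels : List String) : String :=
  pvOuterA labels pvTable_get_node_type

-- ===== PORT B =====
-- Source B's module-level _INDEX dict: alias -> (priority rank, main type)
def pvIndex_get_node_type : PySem.Dict String (Int × String) :=
  PySem.Dict.mk
    [("Chunk", (0, "Chunk")),
     ("Paper", (1, "Paper")),
     ("Reference", (2, "Reference")),
     ("Model/Architecture", (3, "Model/Architecture")),
     ("Method/Technique", (4, "Method/Technique")),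
     ("Task", (5, "Task")),
     ("Metric", (6, "Metric")),
     ("Dataset", (7, "Dataset")),
     ("Author/Organization", (8, "Author/Organization")),
     ("Author", (9, "Author/Organization")),
     ("Venue", (10, "Venue")),
     ("Optimizer/Algorithm", (11, "Optimizer/Algorithm")),
     ("Framework/Library", (12, "Framework/Library")),
     ("ImagePath", (13, "ImagePath")),
     ("Figure:photo", (14, "Figure")),
     ("Figure:diagram", (15, "Figure")),
     ("Figure:chart", (16, "Figure")),
     ("Figure:table", (17, "Figure")),
     ("Figure:graph", (18, "Figure")),
     ("Figure", (19, "Figure"))]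

-- loop body: entry = _INDEX.get(label); keep it if its rank beats the current best
def pvStepB (best : Option (Int × String)) (label : String) : Option (Int × String) :=
  match PySem.Dict.get? pvIndex_get_node_type label with
  | none => best
  | some (r, t) =>
      match best with
      | none => some (r, t)
      | some (r0, t0) => if r < r0 then some (r, t) else some (r0, t0)

def get_node_type_alt (labels : List String) : String :=
  match labels.foldl pvStepB none with
  | some (_, t) => t
  | none => "Other"

-- ===== PRECONDITION & SPEC =====
def Spec_get_node_type (labels : List String) (out : String) : Prop := out = get_node_type_alt labels
instance (labels : List String) (out : String) : Decidable (Spec_get_node_type labels out) := by unfold Spec_get_node_type; infer_instance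

-- ===== CLAIM (what is proved, stated in full; the proofs are below) =====
def Claim_equal_get_node_type : Prop := ∀ (labels : List String), Dom_get_node_type labels → Spec_get_node_type labels (get_node_type labels)

-- ===== LEMMAS AND PROOFS =====

-- first entry of an alias index whose alias occurs in labels
def pvFirstHit (labels : List String) : List (String × Int × String) → Option (Int × String)
  | [] => none
  | (a, v) :: rest => if labels.contains a then some v else pvFirstHit labels rest

def pvGetT : Option (Int × String) → String
  | some (_, t) => t
  | none => "Other"

lemma pvFirstHit_nil (idx : List (String × Int × String)) : pvFirstHit [] idx = none := by
  induction idx with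
  | nil => rfl
  | cons p rest ih => obtain ⟨a, v⟩ := p; simp [pvFirstHit, ih]

lemma pvFirstHit_mem {labels : List String} {idx : List (String × Int × String)}
    {v : Int × String} (h : pvFirstHit labels idx = some v) : ∃ a, (a, v) ∈ idx := by
  induction idx with
  | nil => simp [pvFirstHit] at h
  | cons p rest ih =>
      obtain ⟨a, w⟩ := p
      by_cases hc : a ∈ labels
      · simp [pvFirstHit, hc] at h
        exact ⟨a, by simp [h]⟩
      · simp [pvFirstHit, hc] at h
        obtain ⟨b, hb⟩ := ih h
        exact ⟨b, by simp [hb]⟩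

lemma pvget?_mem {idx : List (String × Int × String)} {l : String} {v : Int × String}
    (h : (PySem.Dict.mk idx).get? l = some v) : ∃ a, (a, v) ∈ idx := by
  induction idx with
  | nil => simp [PySem.Dict.get?] at h
  | cons p rest ih =>
      obtain ⟨a, w⟩ := p
      rw [PySem.Dict.get?_mk_cons] at h
      by_cases he : a = l
      · subst he
        simp at h
        exact ⟨a, by simp [h]⟩
      · simp [he] at h
        obtain ⟨b, hb⟩ := ih h
        exact ⟨b, by simp [hb]⟩

-- generic step for an arbitrary index
def pvStepG (idx : List (String × Int × String)) (best : Option (Int × String)) (label : String) :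
    Option (Int × String) :=
  match (PySem.Dict.mk idx).get? label with
  | none => best
  | some (r, t) =>
      match best with
      | none => some (r, t)
      | some (r0, t0) => if r < r0 then some (r, t) else some (r0, t0)

-- one label extends the seen-prefix of the fold
lemma pvStep_seen (idx : List (String × Int × String))
    (hs : idx.Pairwise (fun p q => p.2.1 < q.2.1)) (seen : List String) (l : String) :
    pvStepG idx (pvFirstHit seen idx) l = pvFirstHit (seen ++ [l]) idx := by
  induction idx with
  | nil => simp [pvStepG, pvFirstHit, PySem.Dict.get?]
  | cons p rest ih =>
      obtain ⟨a, r, t⟩ := p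
      rw [List.pairwise_cons] at hs
      obtain ⟨hhead, htail⟩ := hs
      have hgetcons : ∀ x, (PySem.Dict.mk ((a, (r, t)) :: rest)).get? x
          = if a = x then some (r, t) else (PySem.Dict.mk rest).get? x := by
        intro x
        rw [PySem.Dict.get?_mk_cons]
        by_cases hax : a = x
        · simp [hax]
        · simp [hax]
      by_cases hc : a ∈ seen
      · have hc' : a ∈ seen ++ [l] := by simp [hc]
        simp only [pvFirstHit, List.contains_eq_mem, hc, hc', decide_true, if_pos]
        unfold pvStepG
        rw [hgetcons]
        by_cases hal : a = l
        · simp [hal]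
        · rw [if_neg hal]
          cases hget : (PySem.Dict.mk rest).get? l with
          | none => rfl
          | some v =>
              obtain ⟨r', t'⟩ := v
              obtain ⟨b, hb⟩ := pvget?_mem hget
              have hlt : r < r' := hhead (b, (r', t')) hb
              simp [show ¬ r' < r by omega]
      · by_cases hal : a = l
        · have hc' : a ∈ seen ++ [l] := by simp [hal]
          simp only [pvFirstHit, List.contains_eq_mem, hc, hc', decide_true, decide_false,
            if_pos, Bool.false_eq_true, if_neg, not_false_iff]
          unfold pvStepG
          rw [hgetcons, if_pos hal]
          cases hfh : pvFirstHit seen rest with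
          | none => rfl
          | some v =>
              obtain ⟨r', t'⟩ := v
              obtain ⟨b, hb⟩ := pvFirstHit_mem hfh
              have hlt : r < r' := hhead (b, (r', t')) hb
              simp [hlt]
        · have hc' : a ∉ seen ++ [l] := by simp [hc, hal]
          simp only [pvFirstHit, List.contains_eq_mem, hc, hc', decide_false,
            Bool.false_eq_true, if_neg, not_false_iff]
          rw [← ih htail]
          unfold pvStepG
          rw [hgetcons, if_neg hal]

-- folding all labels from the firstHit of a seen-prefix
lemma pvFold_seen (idx : List (String × Int × String))
    (hs : idx.Pairwise (fun p q => p.2.1 < q.2.1)) (labels seen : List String) :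
    labels.foldl (pvStepG idx) (pvFirstHit seen idx) = pvFirstHit (seen ++ labels) idx := by
  induction labels generalizing seen with
  | nil => simp
  | cons l rest ih =>
      simp only [List.foldl_cons]
      rw [pvStep_seen idx hs seen l, ih (seen ++ [l])]
      simp

lemma pvStepB_eq : pvStepB = pvStepG pvIndex_get_node_type.items := by
  funext best l
  rfl

lemma pvIndex_sorted :
    pvIndex_get_node_type.items.Pairwise (fun p q => p.2.1 < q.2.1) := by
  decide

-- B computes the first index entry whose alias occurs in labels
lemma pvAlt_eq (labels : List String) :
    get_node_type_alt labels = pvGetT (pvFirstHit labels pvIndex_get_node_type.items) := by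
  unfold get_node_type_alt
  rw [pvStepB_eq]
  have h0 : pvFirstHit ([] : List String) pvIndex_get_node_type.items = none :=
    pvFirstHit_nil _
  rw [← h0, pvFold_seen _ pvIndex_sorted labels []]
  simp [pvGetT]

-- flattening A's grouped table into a flat ranked index
def pvFlatG (mt : String) (r : Int) : List String → List (String × Int × String)
  | [] => []
  | a :: as => (a, (r, mt)) :: pvFlatG mt (r + 1) as

def pvFlat (r : Int) : List (String × List String) → List (String × Int × String)
  | [] => []
  | (mt, as) :: rest => pvFlatG mt r as ++ pvFlat (r + as.length) rest

lemma pvInner_none {labels : List String} {mt : String} {as : List String}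
    (h : pvInnerA labels mt as = none) (r : Int) (ys : List (String × Int × String)) :
    pvFirstHit labels (pvFlatG mt r as ++ ys) = pvFirstHit labels ys := by
  induction as generalizing r with
  | nil => rfl
  | cons a as ih =>
      by_cases hc : a ∈ labels
      · simp [pvInnerA, hc] at h
      · rw [pvInnerA, if_neg (by simp [hc])] at h
        simp only [pvFlatG, List.cons_append, pvFirstHit]
        rw [if_neg (by simp [hc]), ih h]

lemma pvInner_some {labels : List String} {mt t : String} {as : List String}
    (h : pvInnerA labels mt as = some t) (r : Int) (ys : List (String × Int × String)) :
    ∃ r', pvFirstHit labels (pvFlatG mt r as ++ ys) = some (r', t) := by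
  induction as generalizing r with
  | nil => simp [pvInnerA] at h
  | cons a as ih =>
      by_cases hc : a ∈ labels
      · rw [pvInnerA, if_pos (by simp [hc])] at h
        refine ⟨r, ?_⟩
        simp only [pvFlatG, List.cons_append, pvFirstHit]
        rw [if_pos (by simp [hc])]
        simp at h
        rw [h]
      · rw [pvInnerA, if_neg (by simp [hc])] at h
        obtain ⟨r', hr'⟩ := ih h (r + 1)
        refine ⟨r', ?_⟩
        simp only [pvFlatG, List.cons_append, pvFirstHit]
        rw [if_neg (by simp [hc]), hr']

lemma pvOuter_eq (labels : List String) (T : List (String × List String)) (r : Int) :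
    pvOuterA labels T = pvGetT (pvFirstHit labels (pvFlat r T)) := by
  induction T generalizing r with
  | nil => rfl
  | cons p rest ih =>
      obtain ⟨mt, as⟩ := p
      cases h : pvInnerA labels mt as with
      | some t =>
          obtain ⟨r', hr'⟩ := pvInner_some h r (pvFlat (r + as.length) rest)
          have ht : t = mt := by
            clear hr'
            induction as with
            | nil => simp [pvInnerA] at h
            | cons a as ih2 =>
                by_cases hc : a ∈ labels
                · rw [pvInnerA, if_pos (by simp [hc])] at h; simpa using h.symm
                · rw [pvInnerA, if_neg (by simp [hc])] at h; exact ih2 h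
          simp only [pvOuterA, h, pvFlat, hr', pvGetT, ht]
      | none =>
          simp only [pvOuterA, h, pvFlat]
          rw [pvInner_none h r (pvFlat (r + as.length) rest), ih]

lemma pvFlat_table : pvFlat 0 pvTable_get_node_type = pvIndex_get_node_type.items := by
  decide

-- A computes the same first hit over the flattened table
lemma pvA_eq (labels : List String) :
    get_node_type labels = pvGetT (pvFirstHit labels pvIndex_get_node_type.items) := by
  rw [get_node_type, pvOuter_eq labels pvTable_get_node_type 0, pvFlat_table]

-- ===== VERDICT (by name: the statement is the Claim_ definition above) =====
theorem get_node_type_spec : Claim_equal_get_node_type := by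
  intro labels _
  unfold Spec_get_node_type
  rw [pvA_eq, pvAlt_eq]
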